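-- pv_equiv track=rewrite | github.com/ganjisriver/TIL | 알고리즘/토스 코테/2번.py | solution
-- ===== SOURCE A (Python) =====
-- from collections import deque
--
-- def solution(relationships, target, limit):
--     answer = 0
--     friend_relation_tree = dict()
--     for one, two in relationships:
--         if one in friend_relation_tree:
--             friend_relation_tree[one].append(two)
--         else:
--             friend_relation_tree[one] = [two]
--         if two in friend_relation_tree:
--             friend_relation_tree[two].append(one)
--         else:
--             friend_relation_tree[two] = [one]
--     visited = set()
--     visited.add(target)
--     friend_queue = deque([(target, 0)])
--     while friend_queue:
--         current, step = friend_queue.popleft()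
--         if step >= limit:
--             break
--         for current_friend in friend_relation_tree[current]:
--             if current_friend not in visited:
--                 visited.add(current_friend)
--                 friend_queue.append((current_friend, step+1))
--                 if step == 0:
--                     answer += 5
--                 elif step > 0:
--                     answer += 11
--     return answer
-- ===== SOURCE B (Python) =====
-- def solution(relationships, target, limit):
--     if limit <= 0:
--         return 0
--     reach = {target}
--     steps = 0
--     while steps < limit:
--         grown = reach | {b for a, b in relationships if a in reach} | {a for a, b in relationships if b in reach}
--         if len(grown) == len(reach):
--             break
--         reach = grown
--         steps += 1
--     near = {b for a, b in relationships if a == target} | {a for a, b in relationships if b == target}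
--     n1 = len(near - {target})
--     return 5 * n1 + 11 * (len(reach) - n1 - 1)
-- ===== Notes on version B (the rewrite author's own statement) =====
-- stated objective: alternative
-- what changed: B drops the adjacency dict, the BFS queue and per-node scoring entirely: it repeatedly saturates the reachable set by whole-set expansion over the raw edge list (at most limit passes, stopping at a fixpoint) and returns the closed form 5*n1 + 11*(|reach| - n1 - 1), where n1 is the number of direct neighbours of target.
-- crash fix: When limit > 0 and target appears in no relationship, A raises KeyError on the bare dict index friend_relation_tree[target]; B returns 0 (no reachable friends). — e.g. on solution([(2, 3)], 1, 1): A raises KeyError, B returns 0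
import Mathlib
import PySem

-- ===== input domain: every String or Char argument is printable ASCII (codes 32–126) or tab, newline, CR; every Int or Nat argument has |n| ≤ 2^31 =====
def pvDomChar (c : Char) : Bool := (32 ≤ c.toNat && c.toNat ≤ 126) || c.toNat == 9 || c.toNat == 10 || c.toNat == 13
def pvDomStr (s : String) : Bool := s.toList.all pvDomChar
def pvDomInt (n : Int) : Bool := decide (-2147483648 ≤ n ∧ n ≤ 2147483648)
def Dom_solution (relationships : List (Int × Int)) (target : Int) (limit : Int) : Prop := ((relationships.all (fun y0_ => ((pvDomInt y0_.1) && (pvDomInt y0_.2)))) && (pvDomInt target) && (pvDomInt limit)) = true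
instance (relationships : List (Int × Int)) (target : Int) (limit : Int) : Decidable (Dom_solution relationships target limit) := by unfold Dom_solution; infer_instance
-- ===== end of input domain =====

-- B replaces the BFS (adjacency dict + queue + per-node scoring) by whole-set saturation over the raw
-- edge list plus the closed form 5*n1 + 11*(|reach| - n1 - 1); equal on Pre_ (A raises KeyError when
-- limit > 0 and target is isolated; B returns 0 there).


-- ===== PORT A =====
-- A's while-loop over the deque; fuel only makes it total (2*|relationships|+2 pops always suffice,
-- since every push adds a fresh node to visited).
def solutionLoopA (tree : PySem.Dict Int (List Int)) (limit : Int) :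
    Nat → PySem.Set Int → List (Int × Int) → Int → Int
  | 0, _, _, ans => ans
  | fuel + 1, visited, queue, ans =>
    match queue with
    | [] => ans
    | (current, step) :: rest =>
      if limit ≤ step then ans
      else
        let st := (tree.getD current []).foldl
          (fun (st : PySem.Set Int × List (Int × Int) × Int) f =>
            if PySem.Set.contains st.1 f then st
            else (PySem.Set.add st.1 f, st.2.1 ++ [(f, step + 1)],
                  st.2.2 + (if step = 0 then 5 else if 0 < step then 11 else 0)))
          (visited, rest, ans)
        solutionLoopA tree limit fuel st.1 st.2.1 st.2.2

def solution (relationships : List (Int × Int)) (target : Int) (limit : Int) : Int :=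
  let tree := relationships.foldl
    (fun t p =>
      let t := if t.contains p.1 then t.modify p.1 [] (· ++ [p.2]) else t.insert p.1 [p.2]
      if t.contains p.2 then t.modify p.2 [] (· ++ [p.1]) else t.insert p.2 [p.1])
    PySem.Dict.empty
  solutionLoopA tree limit (2 * relationships.length + 2)
    (PySem.Set.add PySem.Set.empty target) [(target, 0)] 0

-- ===== PORT B =====
-- grown = reach | {b for a,b in relationships if a in reach} | {a for a,b in relationships if b in reach}
def bStep (relationships : List (Int × Int)) (reach : PySem.Set Int) : PySem.Set Int :=
  PySem.Set.union
    (PySem.Set.union reach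
      (relationships.foldl
        (fun s p => if PySem.Set.contains reach p.1 then PySem.Set.add s p.2 else s)
        PySem.Set.empty))
    (relationships.foldl
      (fun s p => if PySem.Set.contains reach p.2 then PySem.Set.add s p.1 else s)
      PySem.Set.empty)

-- B's saturation while-loop; fuel only makes it total (the loop breaks at a fixpoint, reached
-- within 2*|relationships|+2 growth steps).
def bLoop (relationships : List (Int × Int)) (limit : Int) :
    Nat → Int → PySem.Set Int → PySem.Set Int
  | 0, _, reach => reach
  | fuel + 1, steps, reach =>
    if steps < limit then
      let grown := bStep relationships reach
      if PySem.Set.len grown = PySem.Set.len reach then reach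
      else bLoop relationships limit fuel (steps + 1) grown
    else reach

def solution_alt (relationships : List (Int × Int)) (target : Int) (limit : Int) : Int :=
  if limit ≤ 0 then 0
  else
    let reach := bLoop relationships limit (2 * relationships.length + 2) 0
      (PySem.Set.add PySem.Set.empty target)
    let near := PySem.Set.union
      (relationships.foldl
        (fun s p => if p.1 == target then PySem.Set.add s p.2 else s) PySem.Set.empty)
      (relationships.foldl
        (fun s p => if p.2 == target then PySem.Set.add s p.1 else s) PySem.Set.empty)
    let n1 := PySem.Set.len (PySem.Set.diff near (PySem.Set.add PySem.Set.empty target))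
    5 * n1 + 11 * (PySem.Set.len reach - n1 - 1)

-- ===== PRECONDITION & SPEC =====
-- Pre_ excludes exactly the inputs where Python A raises KeyError: limit > 0 while target occurs in no pair
-- (then friend_relation_tree[target] has no key).
def Pre_solution (relationships : List (Int × Int)) (target : Int) (limit : Int) : Prop :=
  limit ≤ 0 ∨ relationships.any (fun p => p.1 == target || p.2 == target) = true
instance (relationships : List (Int × Int)) (target : Int) (limit : Int) : Decidable (Pre_solution relationships target limit) := by unfold Pre_solution; infer_instance
def pvWitness_solution : (List (Int × Int)) × Int × Int := ([(1, 2), (2, 3)], 1, 2)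

-- When limit > 0 and target appears in no relationship, A raises KeyError on friend_relation_tree[target]; B returns 0.
def Raises_solution (relationships : List (Int × Int)) (target : Int) (limit : Int) : Prop :=
  0 < limit ∧ relationships.all (fun p => p.1 ≠ target ∧ p.2 ≠ target) = true
instance (relationships : List (Int × Int)) (target : Int) (limit : Int) : Decidable (Raises_solution relationships target limit) := by unfold Raises_solution; infer_instance
def pvRaiseWitness_solution : (List (Int × Int)) × Int × Int := ([(2, 3)], 1, 1)
def pvRaiseWitnessOut_solution : Int := 0

def Spec_solution (relationships : List (Int × Int)) (target : Int) (limit : Int) (out : Int) : Prop := out = solution_alt relationships target limit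
instance (relationships : List (Int × Int)) (target : Int) (limit : Int) (out : Int) : Decidable (Spec_solution relationships target limit out) := by unfold Spec_solution; infer_instance

-- ===== CLAIM (what is proved, stated in full; the proofs are below) =====
def Claim_equal_solution : Prop := ∀ (relationships : List (Int × Int)) (target : Int) (limit : Int), Dom_solution relationships target limit → Pre_solution relationships target limit → Spec_solution relationships target limit (solution relationships target limit)
def Claim_raises_solution : Prop := (∀ (relationships : List (Int × Int)) (target : Int) (limit : Int), Dom_solution relationships target limit → Raises_solution relationships target limit → ¬ Pre_solution relationships target limit) ∧ (Dom_solution (pvRaiseWitness_solution.1) (pvRaiseWitness_solution.2.1) (pvRaiseWitness_solution.2.2) ∧ Raises_solution (pvRaiseWitness_solution.1) (pvRaiseWitness_solution.2.1) (pvRaiseWitness_solution.2.2) ∧ solution_alt (pvRaiseWitness_solution.1) (pvRaiseWitness_solution.2.1) (pvRaiseWitness_solution.2.2) = pvRaiseWitnessOut_solution)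

-- ===== LEMMAS AND PROOFS =====

-- The undirected multigraph edge relation of the input list.
def pvEdge (rel : List (Int × Int)) (x y : Int) : Prop := (x, y) ∈ rel ∨ (y, x) ∈ rel

-- Neighbours of a finite set of nodes.
def pvN (rel : List (Int × Int)) (S : Finset Int) : Finset Int :=
  ((rel.filter (fun p => decide (p.1 ∈ S))).map Prod.snd ++
   (rel.filter (fun p => decide (p.2 ∈ S))).map Prod.fst).toFinset

-- Nodes within distance k of t: the common specification both programs are proved against.
def pvW (rel : List (Int × Int)) (t : Int) : Nat → Finset Int
  | 0 => {t}
  | k + 1 => pvW rel t k ∪ pvN rel (pvW rel t k)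

-- All nodes that can ever be reached (endpoints plus t) — used only for fuel accounting.
def pvNodes (rel : List (Int × Int)) (t : Int) : Finset Int :=
  insert t (rel.map Prod.fst ++ rel.map Prod.snd).toFinset

-- Number of distance-1 nodes.
def pvN1 (rel : List (Int × Int)) (t : Int) : Nat := ((pvW rel t 1).erase t).card

-- The common value of both programs for limit >= 1 …
def pvR (rel : List (Int × Int)) (t limit : Int) : Int :=
  5 * ((pvN1 rel t : Nat) : Int) +
    11 * (((pvW rel t limit.toNat).card : Int) - 1 - ((pvN1 rel t : Nat) : Int))

-- … and in general.
def pvT (rel : List (Int × Int)) (t limit : Int) : Int :=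
  if limit ≤ 0 then 0 else pvR rel t limit

theorem mem_pvN (rel : List (Int × Int)) (S : Finset Int) (y : Int) :
    y ∈ pvN rel S ↔ ∃ x ∈ S, pvEdge rel x y := by
  simp only [pvN, List.mem_toFinset, List.mem_append, List.mem_map, List.mem_filter,
    decide_eq_true_eq, pvEdge]
  constructor
  · rintro (⟨p, ⟨hp, hm⟩, rfl⟩ | ⟨p, ⟨hp, hm⟩, rfl⟩)
    · exact ⟨p.1, hm, Or.inl hp⟩
    · exact ⟨p.2, hm, Or.inr hp⟩
  · rintro ⟨x, hx, h | h⟩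
    · exact Or.inl ⟨(x, y), ⟨h, hx⟩, rfl⟩
    · exact Or.inr ⟨(y, x), ⟨h, hx⟩, rfl⟩

theorem mem_pvW_succ (rel : List (Int × Int)) (t : Int) (k : Nat) (y : Int) :
    y ∈ pvW rel t (k + 1) ↔ y ∈ pvW rel t k ∨ ∃ x ∈ pvW rel t k, pvEdge rel x y := by
  simp [pvW, mem_pvN]

theorem pvW_subset_succ (rel : List (Int × Int)) (t : Int) (k : Nat) :
    pvW rel t k ⊆ pvW rel t (k + 1) := by
  intro y hy; rw [mem_pvW_succ]; exact Or.inl hy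

theorem pvW_mono (rel : List (Int × Int)) (t : Int) {k m : Nat} (h : k ≤ m) :
    pvW rel t k ⊆ pvW rel t m := by
  induction m with
  | zero => simpa [Nat.le_zero.mp h]
  | succ m ih =>
    rcases Nat.lt_or_ge k (m + 1) with hlt | hge
    · exact fun y hy => pvW_subset_succ rel t m (ih (Nat.lt_succ_iff.mp hlt) hy)
    · have : k = m + 1 := le_antisymm h hge
      simp [this]

theorem t_mem_pvW (rel : List (Int × Int)) (t : Int) (k : Nat) : t ∈ pvW rel t k :=
  pvW_mono rel t (Nat.zero_le k) (by simp [pvW])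

theorem pvW_stat (rel : List (Int × Int)) (t : Int) {k : Nat}
    (h : pvW rel t (k + 1) = pvW rel t k) :
    ∀ m, k ≤ m → pvW rel t m = pvW rel t k := by
  intro m hm
  induction m with
  | zero => simp [Nat.le_zero.mp hm]
  | succ m ih =>
    rcases Nat.lt_or_ge k (m + 1) with hlt | hge
    · have hmk : k ≤ m := Nat.lt_succ_iff.mp hlt
      have he : pvW rel t m = pvW rel t k := ih hmk
      calc pvW rel t (m + 1) = pvW rel t m ∪ pvN rel (pvW rel t m) := rfl
        _ = pvW rel t k ∪ pvN rel (pvW rel t k) := by rw [he]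
        _ = pvW rel t (k + 1) := rfl
        _ = pvW rel t k := h
    · exact congrArg (pvW rel t) (le_antisymm hge hm).symm ▸ rfl

theorem pvEdge_mem_nodes (rel : List (Int × Int)) (t : Int) {x y : Int}
    (h : pvEdge rel x y) : y ∈ pvNodes rel t := by
  rcases h with h | h
  · exact Finset.mem_insert_of_mem (by
      simp only [List.mem_toFinset, List.mem_append, List.mem_map]
      exact Or.inr ⟨(x, y), h, rfl⟩)
  · exact Finset.mem_insert_of_mem (by
      simp only [List.mem_toFinset, List.mem_append, List.mem_map]
      exact Or.inl ⟨(y, x), h, rfl⟩)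

theorem pvW_subset_nodes (rel : List (Int × Int)) (t : Int) (k : Nat) :
    pvW rel t k ⊆ pvNodes rel t := by
  induction k with
  | zero => intro y hy; simp [pvW] at hy; simp [hy, pvNodes]
  | succ k ih =>
    intro y hy
    rw [mem_pvW_succ] at hy
    rcases hy with hy | ⟨x, _, he⟩
    · exact ih hy
    · exact pvEdge_mem_nodes rel t he

theorem card_pvNodes_le (rel : List (Int × Int)) (t : Int) :
    (pvNodes rel t).card ≤ 2 * rel.length + 1 := by
  calc (pvNodes rel t).card ≤ (rel.map Prod.fst ++ rel.map Prod.snd).toFinset.card + 1 :=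
        Finset.card_insert_le _ _
    _ ≤ (rel.map Prod.fst ++ rel.map Prod.snd).length + 1 :=
        Nat.add_le_add_right (rel.map Prod.fst ++ rel.map Prod.snd).toFinset_card_le 1
    _ = 2 * rel.length + 1 := by simp; ring

theorem pvW_card_ge (rel : List (Int × Int)) (t : Int) :
    ∀ k, (∀ j < k, pvW rel t (j + 1) ≠ pvW rel t j) → k + 1 ≤ (pvW rel t k).card := by
  intro k
  induction k with
  | zero => intro _; simp [pvW]
  | succ k ih =>
    intro h
    have hk : k + 1 ≤ (pvW rel t k).card := ih (fun j hj => h j (Nat.lt_succ_of_lt hj))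
    have hne : pvW rel t (k + 1) ≠ pvW rel t k := h k (Nat.lt_succ_self k)
    have hss : pvW rel t k ⊂ pvW rel t (k + 1) :=
      Finset.ssubset_iff_subset_ne.mpr ⟨pvW_subset_succ rel t k, fun h => hne h.symm⟩
    have := Finset.card_lt_card hss
    omega

theorem pvSat (rel : List (Int × Int)) (t : Int) :
    ∃ j, j ≤ 2 * rel.length ∧ pvW rel t (j + 1) = pvW rel t j := by
  by_contra h
  push_neg at h
  have hge := pvW_card_ge rel t (2 * rel.length + 1)
    (fun j hj => h j (Nat.lt_succ_iff.mp hj))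
  have hle : (pvW rel t (2 * rel.length + 1)).card ≤ 2 * rel.length + 1 :=
    le_trans (Finset.card_le_card (pvW_subset_nodes rel t _)) (card_pvNodes_le rel t)
  omega

-- ===== A-side: the dict build characterised =====

theorem pv_modify_eq_insert (t : PySem.Dict Int (List Int)) (k : Int) (dflt : List Int)
    (f : List Int → List Int) : t.modify k dflt f = t.insert k (f (t.getD k dflt)) := by
  simp [PySem.Dict.modify, PySem.Dict.insert]

-- A's tree build (proof-side name for the fold inside `solution`).
def pvTree (rel : List (Int × Int)) : PySem.Dict Int (List Int) :=
  rel.foldl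
    (fun t p =>
      let t := if t.contains p.1 then t.modify p.1 [] (· ++ [p.2]) else t.insert p.1 [p.2]
      if t.contains p.2 then t.modify p.2 [] (· ++ [p.1]) else t.insert p.2 [p.1])
    PySem.Dict.empty

theorem pv_stepA_eq (t : PySem.Dict Int (List Int)) (a b : Int) :
    (if t.contains a then t.modify a [] (· ++ [b]) else t.insert a [b]) =
      t.modify a [] (· ++ [b]) := by
  by_cases h : t.contains a = true
  · simp [h]
  · have h' : t.contains a = false := by simpa using h
    rw [pv_modify_eq_insert, PySem.Dict.getD_of_not_contains _ _ h']
    simp [h']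

theorem pvTree_eq_flat (rel : List (Int × Int)) :
    ∀ d : PySem.Dict Int (List Int),
    rel.foldl
      (fun t p =>
        let t := if t.contains p.1 then t.modify p.1 [] (· ++ [p.2]) else t.insert p.1 [p.2]
        if t.contains p.2 then t.modify p.2 [] (· ++ [p.1]) else t.insert p.2 [p.1]) d =
    (rel.flatMap (fun p => [(p.1, p.2), (p.2, p.1)])).foldl
      (fun d q => d.modify q.1 [] (· ++ [q.2])) d := by
  induction rel with
  | nil => intro d; rfl
  | cons p rest ih =>
    intro d
    simp only [List.foldl_cons, List.flatMap_cons, List.foldl_append, pv_stepA_eq]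
    rw [← ih]
    simp [pv_stepA_eq]

theorem pvTree_getD (rel : List (Int × Int)) (x y : Int) :
    y ∈ (pvTree rel).getD x [] ↔ pvEdge rel x y := by
  rw [pvTree, pvTree_eq_flat, PySem.Dict.getD_foldl_modify_append]
  simp only [PySem.Dict.getD_empty, List.nil_append, List.mem_map, List.mem_filter,
    List.mem_flatMap, beq_iff_eq, pvEdge]
  constructor
  · rintro ⟨q, ⟨⟨p, hp, hq⟩, hq1⟩, rfl⟩
    simp only [List.mem_cons, List.not_mem_nil, or_false] at hq
    rcases hq with rfl | rfl
    · exact Or.inl (by simpa [← hq1] using hp)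
    · exact Or.inr (by simpa [← hq1] using hp)
  · rintro (h | h)
    · exact ⟨(x, y), ⟨⟨(x, y), h, by simp⟩, rfl⟩, rfl⟩
    · exact ⟨(x, y), ⟨⟨(y, x), h, by simp⟩, rfl⟩, rfl⟩

-- ===== A-side: the inner for-loop over a neighbour list =====

theorem pvInnerFold (stp w : Int) :
    ∀ (l : List Int) (vis : PySem.Set Int) (q : List (Int × Int)) (ans : Int),
    vis.Nodup →
    ∃ fr : List Int,
      l.foldl
        (fun (st : PySem.Set Int × List (Int × Int) × Int) f =>
          if PySem.Set.contains st.1 f then st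
          else (PySem.Set.add st.1 f, st.2.1 ++ [(f, stp)], st.2.2 + w))
        (vis, q, ans)
        = (vis ++ fr, q ++ fr.map (fun n => (n, stp)), ans + w * fr.length)
      ∧ fr.Nodup ∧ (∀ y, y ∈ fr ↔ y ∈ l ∧ y ∉ vis) := by
  intro l
  induction l with
  | nil =>
    intro vis q ans _
    exact ⟨[], by simp, by simp, by simp⟩
  | cons f rest ih =>
    intro vis q ans hnd
    simp only [List.foldl_cons]
    by_cases hf : f ∈ vis
    · have hc : PySem.Set.contains vis f = true := (PySem.Set.contains_iff vis f).mpr hf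
      rw [if_pos hc]
      obtain ⟨fr, heq, hfrnd, hfrmem⟩ := ih vis q ans hnd
      refine ⟨fr, heq, hfrnd, fun y => ?_⟩
      rw [hfrmem y]
      constructor
      · rintro ⟨hy, hyv⟩; exact ⟨List.mem_cons_of_mem f hy, hyv⟩
      · rintro ⟨hy, hyv⟩
        rcases List.mem_cons.mp hy with rfl | hy
        · exact absurd hf hyv
        · exact ⟨hy, hyv⟩
    · have hc : PySem.Set.contains vis f = false := by
        rw [← Bool.not_eq_true]; exact fun h => hf ((PySem.Set.contains_iff vis f).mp h)
      rw [if_neg (fun h => hf ((PySem.Set.contains_iff vis f).mp h))]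
      rw [PySem.Set.add_of_not_mem hf]
      have hnd' : (vis ++ [f]).Nodup := by
        refine List.Nodup.append hnd (by simp) ?_
        intro a ha hb
        rw [List.mem_singleton] at hb
        exact hf (hb ▸ ha)
      obtain ⟨fr, heq, hfrnd, hfrmem⟩ := ih (vis ++ [f]) (q ++ [(f, stp)]) (ans + w) hnd'
      refine ⟨f :: fr, ?_, ?_, ?_⟩
      · rw [heq]
        refine Prod.ext ?_ (Prod.ext ?_ ?_)
        · simp
        · simp
        · simp; ring
      · refine List.nodup_cons.mpr ⟨fun hmem => ?_, hfrnd⟩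
        have := (hfrmem f).mp hmem
        simp at this
      · intro y
        rw [List.mem_cons, hfrmem y]
        constructor
        · rintro (rfl | ⟨hy, hyv⟩)
          · exact ⟨List.mem_cons_self .., hf⟩
          · exact ⟨List.mem_cons_of_mem f hy, fun h => hyv (by simp [h])⟩
        · rintro ⟨hy, hyv⟩
          rcases List.mem_cons.mp hy with rfl | hy
          · exact Or.inl rfl
          · by_cases hyf : y = f
            · exact Or.inl hyf
            · exact Or.inr ⟨hy, by simp [hyv, hyf]⟩

-- ===== A-side: invariant packaging =====

-- The BFS loop invariant: q1 is the unprocessed part of layer s, q2 the discovered part of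
-- layer s+1, vis the discovered nodes, ans the score of the discovered non-target nodes.
def pvInv (rel : List (Int × Int)) (t limit : Int) (s : Nat)
    (q1 q2 vis : List Int) (ans : Int) : Prop :=
  vis.Nodup ∧ q1.Nodup ∧ q2.Nodup ∧
  vis.toFinset = pvW rel t s ∪ q2.toFinset ∧
  (∀ y ∈ q2, y ∉ pvW rel t s) ∧
  (∀ y ∈ q1, y ∈ pvW rel t s) ∧
  (∀ y, y ∈ pvW rel t (s + 1) ↔ y ∈ vis ∨ ∃ x ∈ q1, pvEdge rel x y) ∧
  ans = (if s = 0 then 5 * ((vis.length : Int) - 1)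
    else 5 * ((pvN1 rel t : Nat) : Int) + 11 * ((vis.length : Int) - 1 - ((pvN1 rel t : Nat) : Int))) ∧
  ((s : Int) < limit ∨ ((s : Int) = limit ∧ q2 = []))

theorem pvFinal (rel : List (Int × Int)) (t limit : Int) (s : Nat)
    (vis : List Int) (ans : Int) (hnd : vis.Nodup)
    (hvis : vis.toFinset = pvW rel t s)
    (hW : pvW rel t limit.toNat = pvW rel t s)
    (h1 : s = 0 → pvW rel t 1 = pvW rel t 0)
    (hans : ans = if s = 0 then 5 * ((vis.length : Int) - 1)
      else 5 * ((pvN1 rel t : Nat) : Int) + 11 * ((vis.length : Int) - 1 - ((pvN1 rel t : Nat) : Int))) :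
    ans = pvR rel t limit := by
  have hlen : vis.length = (pvW rel t s).card := by
    rw [← hvis, List.toFinset_card_of_nodup hnd]
  by_cases hs : s = 0
  · subst hs
    have hW1 : pvW rel t 1 = pvW rel t 0 := h1 rfl
    have hn1 : pvN1 rel t = 0 := by
      rw [pvN1, hW1]; simp [pvW]
    have hcard : (pvW rel t limit.toNat).card = 1 := by
      rw [hW]; simp [pvW]
    have hlen1 : vis.length = 1 := by rw [hlen]; simp [pvW]
    rw [hans, pvR, hn1, hcard, hlen1]
    simp
  · rw [pvR, hans, if_neg hs, hlen, hW]

theorem pvEmpty (rel : List (Int × Int)) (t limit : Int) (s : Nat)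
    (vis : List Int) (ans : Int) (h : pvInv rel t limit s [] [] vis ans) :
    ans = pvR rel t limit := by
  obtain ⟨hnd, -, -, hI2, -, -, hI3, hans, hI5⟩ := h
  have hvis : vis.toFinset = pvW rel t s := by simpa using hI2
  have hsat : pvW rel t (s + 1) = pvW rel t s := by
    ext y
    rw [hI3 y, ← hvis, List.mem_toFinset]
    simp
  have hs : (s : Int) ≤ limit := by
    rcases hI5 with h | h
    · omega
    · exact le_of_eq h.1
  have hW : pvW rel t limit.toNat = pvW rel t s :=
    pvW_stat rel t hsat limit.toNat (by omega)
  exact pvFinal rel t limit s vis ans hnd hvis hW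
    (fun h0 => by rw [h0] at hsat; exact hsat) hans

-- ===== A-side: one pop of the queue =====

theorem pvPop (rel : List (Int × Int)) (t limit : Int) (hlim : 1 ≤ limit) (fuel : Nat)
    (ih : ∀ (s : Nat) (q1 q2 vis : List Int) (ans : Int),
      pvInv rel t limit s q1 q2 vis ans →
      q1.length + q2.length + ((pvNodes rel t) \ vis.toFinset).card ≤ fuel →
      solutionLoopA (pvTree rel) limit fuel vis
        (q1.map (fun n => (n, (s : Int))) ++ q2.map (fun n => (n, (s : Int) + 1))) ans
        = pvR rel t limit) :
    ∀ (s : Nat) (c : Int) (q1' q2 vis : List Int) (ans : Int),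
    pvInv rel t limit s (c :: q1') q2 vis ans →
    (c :: q1').length + q2.length + ((pvNodes rel t) \ vis.toFinset).card ≤ fuel + 1 →
    solutionLoopA (pvTree rel) limit (fuel + 1) vis
      ((c :: q1').map (fun n => (n, (s : Int))) ++ q2.map (fun n => (n, (s : Int) + 1))) ans
      = pvR rel t limit := by
  intro s c q1' q2 vis ans hInv hfuel
  obtain ⟨hnd, hndq1, hndq2, hI2, hq2W, hq1W, hI3, hans, hI5⟩ := hInv
  have hq2vis : ∀ y ∈ q2, y ∈ vis := fun y hy => by
    have : y ∈ vis.toFinset := by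
      rw [hI2]; exact Finset.mem_union_right _ (List.mem_toFinset.mpr hy)
    exact List.mem_toFinset.mp this
  have hWsub : ∀ y ∈ pvW rel t s, y ∈ vis := fun y hy =>
    List.mem_toFinset.mp (by rw [hI2]; exact Finset.mem_union_left _ hy)
  simp only [List.map_cons, List.cons_append]
  simp only [solutionLoopA]
  by_cases hbreak : limit ≤ (s : Int)
  · rw [if_pos hbreak]
    rcases hI5 with h | ⟨hseq, hq2nil⟩
    · omega
    · subst hq2nil
      have hvis : vis.toFinset = pvW rel t s := by simpa using hI2
      have hW : pvW rel t limit.toNat = pvW rel t s := by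
        have : limit.toNat = s := by omega
        rw [this]
      exact pvFinal rel t limit s vis ans hnd hvis hW
        (fun h0 => absurd h0 (by omega)) hans
  · rw [if_neg hbreak]
    obtain ⟨fr, heq, hfrnd, hfrmem⟩ := pvInnerFold ((s : Int) + 1)
      (if (s : Int) = 0 then 5 else if 0 < (s : Int) then 11 else 0)
      ((pvTree rel).getD c [])
      vis (q1'.map (fun n => (n, (s : Int))) ++ q2.map (fun n => (n, (s : Int) + 1))) ans hnd
    rw [heq]
    dsimp only
    have hfr : ∀ y, y ∈ fr ↔ pvEdge rel c y ∧ y ∉ vis := fun y => by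
      rw [hfrmem y, pvTree_getD]
    have hw : (if (s : Int) = 0 then (5 : Int) else if 0 < (s : Int) then 11 else 0)
        = (if s = 0 then (5 : Int) else 11) := by
      by_cases h : s = 0
      · simp [h]
      · have h1 : ¬((s : Int) = 0) := by omega
        have h2 : 0 < (s : Int) := by omega
        simp [h, h1, h2]
    have hqueue : (q1'.map (fun n => (n, (s : Int))) ++ q2.map (fun n => (n, (s : Int) + 1)))
        ++ fr.map (fun n => (n, (s : Int) + 1))
        = q1'.map (fun n => (n, (s : Int))) ++ (q2 ++ fr).map (fun n => (n, (s : Int) + 1)) := by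
      rw [List.map_append, List.append_assoc]
    rw [hqueue, hw]
    have hfrvis : ∀ y ∈ fr, y ∉ vis := fun y hy => ((hfr y).mp hy).2
    have hfrnodes : ∀ y ∈ fr, y ∈ pvNodes rel t := fun y hy =>
      pvEdge_mem_nodes rel t ((hfr y).mp hy).1
    have hnd' : (vis ++ fr).Nodup :=
      List.Nodup.append hnd hfrnd (fun a ha hb => hfrvis a hb ha)
    have hndq2' : (q2 ++ fr).Nodup :=
      List.Nodup.append hndq2 hfrnd (fun a ha hb => hfrvis a hb (hq2vis a ha))
    have hI2' : (vis ++ fr).toFinset = pvW rel t s ∪ (q2 ++ fr).toFinset := by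
      rw [List.toFinset_append, List.toFinset_append, hI2, Finset.union_assoc]
    have hq2W' : ∀ y ∈ q2 ++ fr, y ∉ pvW rel t s := by
      intro y hy
      rcases List.mem_append.mp hy with hy | hy
      · exact hq2W y hy
      · exact fun hyW => hfrvis y hy (hWsub y hyW)
    have hq1W' : ∀ y ∈ q1', y ∈ pvW rel t s := fun y hy => hq1W y (List.mem_cons_of_mem c hy)
    have hI3' : ∀ y, y ∈ pvW rel t (s + 1) ↔ y ∈ vis ++ fr ∨ ∃ x ∈ q1', pvEdge rel x y := by
      intro y
      rw [hI3 y]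
      constructor
      · rintro (hy | ⟨x, hx, he⟩)
        · exact Or.inl (List.mem_append.mpr (Or.inl hy))
        · rcases List.mem_cons.mp hx with rfl | hx
          · by_cases hyv : y ∈ vis
            · exact Or.inl (List.mem_append.mpr (Or.inl hyv))
            · exact Or.inl (List.mem_append.mpr (Or.inr ((hfr y).mpr ⟨he, hyv⟩)))
          · exact Or.inr ⟨x, hx, he⟩
      · rintro (hy | ⟨x, hx, he⟩)
        · rcases List.mem_append.mp hy with hy | hy
          · exact Or.inl hy
          · exact Or.inr ⟨c, List.mem_cons_self .., ((hfr y).mp hy).1⟩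
        · exact Or.inr ⟨x, List.mem_cons_of_mem c hx, he⟩
    have hans' : ans + (if s = 0 then (5 : Int) else 11) * fr.length
        = (if s = 0 then 5 * (((vis ++ fr).length : Int) - 1)
          else 5 * ((pvN1 rel t : Nat) : Int) +
            11 * (((vis ++ fr).length : Int) - 1 - ((pvN1 rel t : Nat) : Int))) := by
      by_cases h : s = 0
      · rw [hans, if_pos h, if_pos h, if_pos h, List.length_append]
        push_cast; ring
      · rw [hans, if_neg h, if_neg h, if_neg h, List.length_append]
        push_cast; ring
    have hfrF : fr.toFinset ⊆ (pvNodes rel t) \ vis.toFinset := by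
      intro y hy
      rw [List.mem_toFinset] at hy
      exact Finset.mem_sdiff.mpr
        ⟨hfrnodes y hy, fun hv => hfrvis y hy (List.mem_toFinset.mp hv)⟩
    have hsd : ((pvNodes rel t) \ (vis ++ fr).toFinset)
        = ((pvNodes rel t) \ vis.toFinset) \ fr.toFinset := by
      rw [List.toFinset_append]
      ext y
      simp only [Finset.mem_sdiff, Finset.mem_union]
      tauto
    have hcard : ((pvNodes rel t) \ vis.toFinset).card
        = ((pvNodes rel t) \ (vis ++ fr).toFinset).card + fr.length := by
      have h := Finset.card_sdiff_add_card_eq_card hfrF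
      rw [List.toFinset_card_of_nodup hfrnd] at h
      rw [hsd]
      omega
    refine ih s q1' (q2 ++ fr) (vis ++ fr) _
      ⟨hnd', hndq1.of_cons, hndq2', hI2', hq2W', hq1W', hI3', hans', Or.inl (by omega)⟩ ?_
    simp only [List.length_append]
    simp only [List.length_cons] at hfuel
    omega

-- ===== A-side: the main BFS invariant =====

theorem pvLoopA (rel : List (Int × Int)) (t limit : Int) (hlim : 1 ≤ limit) :
    ∀ (fuel : Nat) (s : Nat) (q1 q2 vis : List Int) (ans : Int),
    pvInv rel t limit s q1 q2 vis ans →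
    q1.length + q2.length + ((pvNodes rel t) \ vis.toFinset).card ≤ fuel →
    solutionLoopA (pvTree rel) limit fuel vis
      (q1.map (fun n => (n, (s : Int))) ++ q2.map (fun n => (n, (s : Int) + 1))) ans
      = pvR rel t limit := by
  intro fuel
  induction fuel with
  | zero =>
    intro s q1 q2 vis ans hInv hfuel
    have hq1 : q1 = [] := List.eq_nil_of_length_eq_zero (by omega)
    have hq2 : q2 = [] := List.eq_nil_of_length_eq_zero (by omega)
    subst hq1; subst hq2
    simp only [List.map_nil, List.nil_append, solutionLoopA]
    exact pvEmpty rel t limit s vis ans hInv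
  | succ fuel ih =>
    intro s q1 q2 vis ans hInv hfuel
    cases q1 with
    | cons c q1' => exact pvPop rel t limit hlim fuel ih s c q1' q2 vis ans hInv hfuel
    | nil =>
      cases q2 with
      | nil =>
        simp only [List.map_nil, List.nil_append, solutionLoopA]
        exact pvEmpty rel t limit s vis ans hInv
      | cons c q2' =>
        obtain ⟨hnd, hndq1, hndq2, hI2, hq2W, hq1W, hI3, hans, hI5⟩ := hInv
        have hslt : (s : Int) < limit := by
          rcases hI5 with h | ⟨h1, h2⟩
          · exact h
          · cases h2
        have hvisW1 : vis.toFinset = pvW rel t (s + 1) := by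
          ext y
          rw [List.mem_toFinset, hI3 y]
          simp
        have hq2vis : ∀ y ∈ c :: q2', y ∈ vis := fun y hy => by
          have h : y ∈ vis.toFinset := by
            rw [hI2]; exact Finset.mem_union_right _ (List.mem_toFinset.mpr hy)
          exact List.mem_toFinset.mp h
        have hInv' : pvInv rel t limit (s + 1) (c :: q2') [] vis ans := by
          refine ⟨hnd, hndq2, by simp, by rw [hvisW1]; simp, by simp, ?_, ?_, ?_, ?_⟩
          · intro y hy
            rw [← hvisW1]
            exact List.mem_toFinset.mpr (hq2vis y hy)
          · intro y
            rw [mem_pvW_succ]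
            constructor
            · rintro (hy | ⟨x, hx, he⟩)
              · exact Or.inl (List.mem_toFinset.mp (hvisW1 ▸ hy))
              · have hx' : x ∈ vis.toFinset := hvisW1 ▸ hx
                rw [hI2] at hx'
                rcases Finset.mem_union.mp hx' with hxW | hxq
                · have hyW : y ∈ pvW rel t (s + 1) :=
                    (mem_pvW_succ rel t s y).mpr (Or.inr ⟨x, hxW, he⟩)
                  rcases (hI3 y).mp hyW with h | ⟨x', hx', -⟩
                  · exact Or.inl h
                  · cases hx'
                · exact Or.inr ⟨x, List.mem_toFinset.mp hxq, he⟩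
            · rintro (hy | ⟨x, hx, he⟩)
              · exact Or.inl (by rw [← hvisW1]; exact List.mem_toFinset.mpr hy)
              · exact Or.inr ⟨x, by rw [← hvisW1]; exact List.mem_toFinset.mpr (hq2vis x hx), he⟩
          · by_cases h : s = 0
            · subst h
              have htW : t ∈ pvW rel t 1 := t_mem_pvW rel t 1
              have hlen : vis.length = (pvW rel t 1).card := by
                rw [← hvisW1, List.toFinset_card_of_nodup hnd]
              have hn1 : pvN1 rel t + 1 = (pvW rel t 1).card := by
                rw [pvN1, Finset.card_erase_of_mem htW]
                have h1 : 1 ≤ (pvW rel t 1).card := Finset.card_pos.mpr ⟨t, htW⟩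
                omega
              rw [hans]
              simp only [if_pos rfl, if_neg (Nat.succ_ne_zero 0)]
              have he : ((pvN1 rel t : Nat) : Int) = (vis.length : Int) - 1 := by omega
              rw [he]; ring_nf; simp
            · rw [hans, if_neg h, if_neg (by omega : ¬ s + 1 = 0)]
          · by_cases h : ((s : Int) + 1) < limit
            · exact Or.inl (by push_cast; omega)
            · exact Or.inr ⟨by push_cast; omega, rfl⟩
        have hq : (([] : List Int).map (fun n => (n, (s : Int))) ++
              (c :: q2').map (fun n => (n, (s : Int) + 1)))
            = ((c :: q2').map (fun n => (n, ((s + 1 : Nat) : Int))) ++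
              ([] : List Int).map (fun n => (n, ((s + 1 : Nat) : Int) + 1))) := by
          push_cast; simp
        rw [hq]
        refine pvPop rel t limit hlim fuel ih (s + 1) c q2' [] vis ans hInv' ?_
        simp only [List.length_cons, List.length_nil] at hfuel ⊢
        omega

-- A equals the common value (no precondition needed for the ports).
theorem pvA_eq (rel : List (Int × Int)) (t limit : Int) :
    solution rel t limit = pvT rel t limit := by
  by_cases hl0 : limit ≤ 0
  · rw [pvT, if_pos hl0]
    show solutionLoopA (pvTree rel) limit (2 * rel.length + 2)
      (PySem.Set.add PySem.Set.empty t) [(t, 0)] 0 = 0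
    have h2 : 2 * rel.length + 2 = (2 * rel.length + 1) + 1 := by omega
    rw [h2]
    simp only [solutionLoopA]
    rw [if_pos hl0]
  · have hlim : 1 ≤ limit := by omega
    rw [pvT, if_neg hl0]
    show solutionLoopA (pvTree rel) limit (2 * rel.length + 2)
      (PySem.Set.add PySem.Set.empty t) [(t, 0)] 0 = pvR rel t limit
    have hvis : PySem.Set.add PySem.Set.empty t = [t] := rfl
    rw [hvis]
    have hq : ([((t : Int), (0 : Int))])
        = (([t] : List Int).map (fun n => (n, ((0 : Nat) : Int))) ++
          ([] : List Int).map (fun n => (n, ((0 : Nat) : Int) + 1))) := by simp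
    rw [hq]
    refine pvLoopA rel t limit hlim (2 * rel.length + 2) 0 [t] [] [t] 0
      ⟨?_, ?_, ?_, ?_, ?_, ?_, ?_, ?_, ?_⟩ ?_
    · simp
    · simp
    · simp
    · simp [pvW]
    · simp
    · intro y hy; simp only [List.mem_singleton] at hy; simp [pvW, hy]
    · intro y
      rw [mem_pvW_succ]
      simp [pvW]
    · simp
    · exact Or.inl (by push_cast; omega)
    · have htm : t ∈ pvNodes rel t := Finset.mem_insert_self t _
      have hsub : ((pvNodes rel t) \ ([t] : List Int).toFinset) = (pvNodes rel t).erase t := by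
        simp [Finset.sdiff_singleton_eq_erase]
      have hc1 : ((pvNodes rel t).erase t).card = (pvNodes rel t).card - 1 :=
        Finset.card_erase_of_mem htm
      have hc2 := card_pvNodes_le rel t
      simp only [List.length_singleton, List.length_nil, hsub, hc1]
      omega

-- ===== B-side =====

theorem pvFoldAdd2 (c : Int × Int → Bool) :
    ∀ (l : List (Int × Int)) (acc : PySem.Set Int), acc.Nodup →
    (l.foldl (fun s p => if c p then PySem.Set.add s p.2 else s) acc).Nodup ∧
    (∀ y, y ∈ l.foldl (fun s p => if c p then PySem.Set.add s p.2 else s) acc ↔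
      y ∈ acc ∨ ∃ p ∈ l, c p = true ∧ y = p.2) := by
  intro l
  induction l with
  | nil => intro acc h; exact ⟨h, by simp⟩
  | cons p rest ih =>
    intro acc h
    simp only [List.foldl_cons]
    by_cases hp : c p = true
    · rw [if_pos hp]
      obtain ⟨h1, h2⟩ := ih (PySem.Set.add acc p.2) (PySem.Set.nodup_add acc p.2 h)
      refine ⟨h1, fun y => ?_⟩
      rw [h2 y, PySem.Set.mem_add]
      constructor
      · rintro ((hy | rfl) | ⟨q, hq, hcq, rfl⟩)
        · exact Or.inl hy
        · exact Or.inr ⟨p, List.mem_cons_self .., hp, rfl⟩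
        · exact Or.inr ⟨q, List.mem_cons_of_mem p hq, hcq, rfl⟩
      · rintro (hy | ⟨q, hq, hcq, rfl⟩)
        · exact Or.inl (Or.inl hy)
        · rcases List.mem_cons.mp hq with rfl | hq
          · exact Or.inl (Or.inr rfl)
          · exact Or.inr ⟨q, hq, hcq, rfl⟩
    · rw [if_neg hp]
      obtain ⟨h1, h2⟩ := ih acc h
      refine ⟨h1, fun y => ?_⟩
      rw [h2 y]
      constructor
      · rintro (hy | ⟨q, hq, hcq, rfl⟩)
        · exact Or.inl hy
        · exact Or.inr ⟨q, List.mem_cons_of_mem p hq, hcq, rfl⟩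
      · rintro (hy | ⟨q, hq, hcq, rfl⟩)
        · exact Or.inl hy
        · rcases List.mem_cons.mp hq with rfl | hq
          · exact absurd hcq hp
          · exact Or.inr ⟨q, hq, hcq, rfl⟩

theorem pvFoldAdd1 (c : Int × Int → Bool) :
    ∀ (l : List (Int × Int)) (acc : PySem.Set Int), acc.Nodup →
    (l.foldl (fun s p => if c p then PySem.Set.add s p.1 else s) acc).Nodup ∧
    (∀ y, y ∈ l.foldl (fun s p => if c p then PySem.Set.add s p.1 else s) acc ↔
      y ∈ acc ∨ ∃ p ∈ l, c p = true ∧ y = p.1) := by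
  intro l
  induction l with
  | nil => intro acc h; exact ⟨h, by simp⟩
  | cons p rest ih =>
    intro acc h
    simp only [List.foldl_cons]
    by_cases hp : c p = true
    · rw [if_pos hp]
      obtain ⟨h1, h2⟩ := ih (PySem.Set.add acc p.1) (PySem.Set.nodup_add acc p.1 h)
      refine ⟨h1, fun y => ?_⟩
      rw [h2 y, PySem.Set.mem_add]
      constructor
      · rintro ((hy | rfl) | ⟨q, hq, hcq, rfl⟩)
        · exact Or.inl hy
        · exact Or.inr ⟨p, List.mem_cons_self .., hp, rfl⟩
        · exact Or.inr ⟨q, List.mem_cons_of_mem p hq, hcq, rfl⟩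
      · rintro (hy | ⟨q, hq, hcq, rfl⟩)
        · exact Or.inl (Or.inl hy)
        · rcases List.mem_cons.mp hq with rfl | hq
          · exact Or.inl (Or.inr rfl)
          · exact Or.inr ⟨q, hq, hcq, rfl⟩
    · rw [if_neg hp]
      obtain ⟨h1, h2⟩ := ih acc h
      refine ⟨h1, fun y => ?_⟩
      rw [h2 y]
      constructor
      · rintro (hy | ⟨q, hq, hcq, rfl⟩)
        · exact Or.inl hy
        · exact Or.inr ⟨q, List.mem_cons_of_mem p hq, hcq, rfl⟩
      · rintro (hy | ⟨q, hq, hcq, rfl⟩)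
        · exact Or.inl hy
        · rcases List.mem_cons.mp hq with rfl | hq
          · exact absurd hcq hp
          · exact Or.inr ⟨q, hq, hcq, rfl⟩

theorem pvBStep_spec (rel : List (Int × Int)) (reach : PySem.Set Int) (hnd : reach.Nodup) :
    (bStep rel reach).Nodup ∧
    (∀ y, y ∈ bStep rel reach ↔ y ∈ reach ∨ ∃ x ∈ reach, pvEdge rel x y) := by
  obtain ⟨h1nd, h1mem⟩ := pvFoldAdd2 (fun p => PySem.Set.contains reach p.1) rel
    PySem.Set.empty (by simp [PySem.Set.empty])
  obtain ⟨h2nd, h2mem⟩ := pvFoldAdd1 (fun p => PySem.Set.contains reach p.2) rel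
    PySem.Set.empty (by simp [PySem.Set.empty])
  unfold bStep
  refine ⟨PySem.Set.nodup_union _ _ (PySem.Set.nodup_union _ _ hnd), fun y => ?_⟩
  rw [PySem.Set.mem_union, PySem.Set.mem_union, h1mem y, h2mem y]
  constructor
  · rintro ((hy | (hy | ⟨⟨a, b⟩, hp, hcp, rfl⟩)) | (hy | ⟨⟨a, b⟩, hp, hcp, rfl⟩))
    · exact Or.inl hy
    · simp [PySem.Set.empty] at hy
    · exact Or.inr ⟨a, (PySem.Set.contains_iff _ _).mp hcp, Or.inl hp⟩
    · simp [PySem.Set.empty] at hy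
    · exact Or.inr ⟨b, (PySem.Set.contains_iff _ _).mp hcp, Or.inr hp⟩
  · rintro (hy | ⟨x, hx, he | he⟩)
    · exact Or.inl (Or.inl hy)
    · exact Or.inl (Or.inr (Or.inr ⟨(x, y), he, (PySem.Set.contains_iff _ _).mpr hx, rfl⟩))
    · exact Or.inr (Or.inr ⟨(y, x), he, (PySem.Set.contains_iff _ _).mpr hx, rfl⟩)

theorem pvLoopB (rel : List (Int × Int)) (t limit : Int) (hlim : 1 ≤ limit) :
    ∀ (fuel : Nat) (s : Nat) (reach : PySem.Set Int), reach.Nodup →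
    reach.toFinset = pvW rel t s → (s : Int) ≤ limit →
    2 * rel.length + 2 ≤ fuel + s →
    (bLoop rel limit fuel (s : Int) reach).Nodup ∧
    (bLoop rel limit fuel (s : Int) reach).toFinset = pvW rel t limit.toNat := by
  intro fuel
  induction fuel with
  | zero =>
    intro s reach hnd hW hs hfuel
    simp only [bLoop]
    obtain ⟨j, hj, hsat⟩ := pvSat rel t
    have hstat := pvW_stat rel t hsat
    have h1 : pvW rel t s = pvW rel t j := hstat s (by omega)
    have h2 : pvW rel t limit.toNat = pvW rel t j := hstat limit.toNat (by omega)
    exact ⟨hnd, by rw [hW, h1, h2]⟩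
  | succ fuel ih =>
    intro s reach hnd hW hs hfuel
    simp only [bLoop]
    by_cases hlt : (s : Int) < limit
    · rw [if_pos hlt]
      obtain ⟨hgnd, hgmem⟩ := pvBStep_spec rel reach hnd
      have hgfin : (bStep rel reach).toFinset = pvW rel t (s + 1) := by
        ext y
        rw [List.mem_toFinset, hgmem y, mem_pvW_succ, ← hW]
        simp [List.mem_toFinset]
      obtain ⟨ext, hext⟩ : ∃ ext, bStep rel reach = reach ++ ext := by
        unfold bStep
        simp only [PySem.Set.union]
        rw [PySem.Set.update_eq_append_filter, PySem.Set.update_eq_append_filter,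
          List.append_assoc]
        exact ⟨_, rfl⟩
      by_cases hlen : PySem.Set.len (bStep rel reach) = PySem.Set.len reach
      · rw [if_pos hlen]
        have hext0 : ext = [] := by
          have := hlen
          rw [hext] at this
          simp only [PySem.Set.len, List.length_append] at this
          have : ext.length = 0 := by omega
          exact List.eq_nil_of_length_eq_zero this
        have hsat : pvW rel t (s + 1) = pvW rel t s := by
          rw [← hgfin, ← hW, hext, hext0, List.append_nil]
        have := pvW_stat rel t hsat limit.toNat (by omega)
        exact ⟨hnd, by rw [hW, this]⟩
      · rw [if_neg hlen]
        have hcast : (s : Int) + 1 = ((s + 1 : Nat) : Int) := by push_cast; ring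
        rw [hcast]
        exact ih (s + 1) (bStep rel reach) hgnd hgfin (by omega) (by omega)
    · rw [if_neg hlt]
      have hseq : limit.toNat = s := by omega
      exact ⟨hnd, by rw [hW, hseq]⟩

-- B equals the common value (total).
theorem pvB_eq (rel : List (Int × Int)) (t limit : Int) :
    solution_alt rel t limit = pvT rel t limit := by
  by_cases hl0 : limit ≤ 0
  · simp [solution_alt, pvT, hl0]
  · have hlim : 1 ≤ limit := by omega
    unfold solution_alt pvT
    rw [if_neg hl0, if_neg hl0]
    have hinit : PySem.Set.add PySem.Set.empty t = [t] := rfl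
    have h0fin : ([t] : List Int).toFinset = pvW rel t 0 := by simp [pvW]
    have hcast0 : (0 : Int) = ((0 : Nat) : Int) := rfl
    obtain ⟨hrnd, hrfin⟩ := pvLoopB rel t limit hlim (2 * rel.length + 2) 0 [t]
      (by simp) h0fin (by omega) (by omega)
    obtain ⟨hn1nd, hn1mem⟩ := pvFoldAdd2 (fun p => p.1 == t) rel
      PySem.Set.empty (by simp [PySem.Set.empty])
    obtain ⟨hn2nd, hn2mem⟩ := pvFoldAdd1 (fun p => p.2 == t) rel
      PySem.Set.empty (by simp [PySem.Set.empty])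
    set near := PySem.Set.union
      (rel.foldl (fun s p => if p.1 == t then PySem.Set.add s p.2 else s) PySem.Set.empty)
      (rel.foldl (fun s p => if p.2 == t then PySem.Set.add s p.1 else s) PySem.Set.empty)
      with hneardef
    have hnearnd : near.Nodup := PySem.Set.nodup_union _ _ hn1nd
    have hnearmem : ∀ y, y ∈ near ↔ pvEdge rel t y := by
      intro y
      rw [hneardef, PySem.Set.mem_union, hn1mem y, hn2mem y]
      constructor
      · rintro ((hy | ⟨⟨a, b⟩, hp, hcp, rfl⟩) | (hy | ⟨⟨a, b⟩, hp, hcp, rfl⟩))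
        · simp [PySem.Set.empty] at hy
        · simp only [beq_iff_eq] at hcp
          exact Or.inl (hcp ▸ hp)
        · simp [PySem.Set.empty] at hy
        · simp only [beq_iff_eq] at hcp
          exact Or.inr (hcp ▸ hp)
      · rintro (he | he)
        · exact Or.inl (Or.inr ⟨(t, y), he, by simp, rfl⟩)
        · exact Or.inr (Or.inr ⟨(y, t), he, by simp, rfl⟩)
    set D := PySem.Set.diff near (PySem.Set.add PySem.Set.empty t) with hDdef
    have hDnd : D.Nodup := PySem.Set.nodup_diff _ _ hnearnd
    have hDmem : ∀ y, y ∈ D ↔ pvEdge rel t y ∧ y ≠ t := by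
      intro y
      rw [hDdef, PySem.Set.mem_diff, hnearmem y]
      constructor
      · rintro ⟨he, hne⟩
        exact ⟨he, fun h => hne (by simp [h, PySem.Set.add, PySem.Set.empty])⟩
      · rintro ⟨he, hne⟩
        exact ⟨he, fun h => hne (by simpa [PySem.Set.add, PySem.Set.empty] using h)⟩
    have hDfin : D.toFinset = (pvW rel t 1).erase t := by
      ext y
      rw [List.mem_toFinset, hDmem y, Finset.mem_erase, mem_pvW_succ]
      simp only [pvW, Finset.mem_singleton]
      constructor
      · rintro ⟨he, hne⟩
        exact ⟨hne, Or.inr ⟨t, rfl, he⟩⟩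
      · rintro ⟨hne, rfl | ⟨x, rfl, he⟩⟩
        · exact absurd rfl hne
        · exact ⟨he, hne⟩
    have hDlen : (D.length : Int) = ((pvN1 rel t : Nat) : Int) := by
      rw [pvN1, ← hDfin, List.toFinset_card_of_nodup hDnd]
    have hRlen : ((bLoop rel limit (2 * rel.length + 2) ((0 : Nat) : Int) [t]).length : Int)
        = ((pvW rel t limit.toNat).card : Int) := by
      rw [← hrfin, List.toFinset_card_of_nodup hrnd]
    rw [hinit, hcast0, pvR]
    simp only [PySem.Set.len]
    have hD2 : ((List.length (PySem.Set.diff near ([t] : List Int)) : Nat) : Int)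
        = ((pvN1 rel t : Nat) : Int) := hDlen
    rw [hRlen, hD2]
    ring

-- ===== VERDICT (by name: the statement is the Claim_ definition above) =====
theorem solution_spec : Claim_equal_solution := by
  intro rel t limit _ _
  unfold Spec_solution
  rw [pvA_eq, pvB_eq]

theorem solution_raises : Claim_raises_solution := by
  unfold Claim_raises_solution
  constructor
  · intro relationships target limit _ hr hp
    obtain ⟨hlim, hall⟩ := hr
    cases hp with
    | inl h => omega
    | inr h =>
      rw [List.any_eq_true] at h
      obtain ⟨p, hmem, hp⟩ := h
      rw [List.all_eq_true] at hall
      have := hall p hmem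
      simp at this hp
      rcases hp with h | h <;> simp [h] at this
  · exact ⟨by decide, by decide, by decide⟩

-- self-check: the recorded literal pvRaiseWitnessOut_solution is B's value at the raise witness
theorem pvRaiseWitness_ok :
    solution_alt pvRaiseWitness_solution.1 pvRaiseWitness_solution.2.1 pvRaiseWitness_solution.2.2 =
      pvRaiseWitnessOut_solution := by
  have h := solution_raises
  unfold Claim_raises_solution at h
  exact h.2.2.2
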